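-- pv_equiv track=rewrite | github.com/manklab/Darolti_etal_2022_guppy_sexchromo | pairwise_synteny_analysis/maf-dotplot.py | mafBlocks
-- ===== SOURCE A (Python) =====
-- def mafBlocks(beg1, beg2, seq1, seq2):
-- 	'''
-- 	Get the gapless blocks of an alignment, from MAF format.
-- 	Code from "last-dotplot" : http://last.cbrc.jp
-- 	'''
-- 	size = 0  # length of each alignment, excluding gaps
-- 	for x, y in zip(seq1, seq2):
-- 		if x == '-':  # a gap
-- 			if size:
-- 				yield beg1, beg2, size
-- 				beg1 += size
-- 				beg2 += size
-- 				size = 0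
-- 			beg2 += 1
-- 		elif y == '-':  # a gap
-- 			if size:
-- 				yield beg1, beg2, size
-- 				beg1 += size
-- 				beg2 += size
-- 				size = 0
-- 			beg1 += 1
-- 		else:
-- 			size += 1
--
-- 	# the last alignment block
-- 	if size:
-- 		yield beg1, beg2, size
-- ===== SOURCE B (Python) =====
-- def mafBlocks(beg1, beg2, seq1, seq2):
--     '''Run-segmentation rewrite: emit each maximal gapless run as one unit.'''
--     cols = list(zip(seq1, seq2))
--     n = len(cols)
--     i = 0
--     while i < n:
--         x, y = cols[i]
--         if x != '-' and y != '-':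
--             j = i + 1
--             while j < n and cols[j][0] != '-' and cols[j][1] != '-':
--                 j += 1
--             L = j - i
--             yield beg1, beg2, L
--             beg1 += L
--             beg2 += L
--             i = j
--         else:
--             if x == '-':
--                 beg2 += 1
--             else:
--                 beg1 += 1
--             i += 1
-- ===== Notes on version B (the rewrite author's own statement) =====
-- stated objective: alternative
-- what changed: Instead of A's column-by-column scan that accumulates a running size flushed at each gap, B segments the zipped columns into maximal gapless runs (inner run-extension scan) and emits each run as one block in a single step.
import Mathlib
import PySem

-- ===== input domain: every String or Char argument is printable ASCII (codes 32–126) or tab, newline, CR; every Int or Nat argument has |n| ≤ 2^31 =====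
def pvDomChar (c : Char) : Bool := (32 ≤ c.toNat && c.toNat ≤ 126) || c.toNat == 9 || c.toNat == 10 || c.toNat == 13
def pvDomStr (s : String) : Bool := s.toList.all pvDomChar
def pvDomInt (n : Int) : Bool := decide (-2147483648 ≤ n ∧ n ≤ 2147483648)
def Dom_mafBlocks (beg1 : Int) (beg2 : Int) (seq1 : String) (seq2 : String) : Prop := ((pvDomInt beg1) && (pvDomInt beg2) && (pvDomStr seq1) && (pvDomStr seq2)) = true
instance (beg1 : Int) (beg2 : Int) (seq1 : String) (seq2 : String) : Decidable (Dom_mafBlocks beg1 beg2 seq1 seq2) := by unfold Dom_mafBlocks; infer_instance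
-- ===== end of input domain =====

-- B segments the zipped columns into maximal gapless runs and emits each run as one block,
-- instead of A's running size flushed at each gap (alternative decomposition, same O(n) cost).


-- ===== PORT A =====
-- A's loop over zip(seq1, seq2) with state (beg1, beg2, size), flushing on each gap column.
def mafAGo : List (Char × Char) → Int → Int → Int → List (Int × Int × Int)
  | [], b1, b2, size => if size ≠ 0 then [(b1, b2, size)] else []
  | (x, y) :: rest, b1, b2, size =>
    if x = '-' then
      if size ≠ 0 then (b1, b2, size) :: mafAGo rest (b1 + size) (b2 + size + 1) 0
      else mafAGo rest b1 (b2 + 1) 0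
    else if y = '-' then
      if size ≠ 0 then (b1, b2, size) :: mafAGo rest (b1 + size + 1) (b2 + size) 0
      else mafAGo rest (b1 + 1) b2 0
    else
      mafAGo rest b1 b2 (size + 1)

def mafBlocks (beg1 : Int) (beg2 : Int) (seq1 : String) (seq2 : String) : List (Int × Int × Int) :=
  mafAGo (List.zip seq1.toList seq2.toList) beg1 beg2 0

-- ===== PORT B =====
def isMatchCol (p : Char × Char) : Bool := p.1 != '-' && p.2 != '-'

-- B's index loop, as recursion over the remaining columns: at a match column take the
-- whole maximal run at once (j scans forward = takeWhile), at a gap column step by one.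
def mafBGo : List (Char × Char) → Int → Int → List (Int × Int × Int)
  | [], _, _ => []
  | (x, y) :: rest, b1, b2 =>
    if isMatchCol (x, y) then
      let run := rest.takeWhile isMatchCol
      let L : Int := 1 + run.length
      (b1, b2, L) :: mafBGo (rest.drop run.length) (b1 + L) (b2 + L)
    else if x = '-' then
      mafBGo rest b1 (b2 + 1)
    else
      mafBGo rest (b1 + 1) b2
termination_by l _ _ => l.length
decreasing_by
  all_goals simp only [List.length_drop, List.length_cons]
  all_goals omega

def mafBlocks_alt (beg1 : Int) (beg2 : Int) (seq1 : String) (seq2 : String) : List (Int × Int × Int) :=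
  mafBGo (List.zip seq1.toList seq2.toList) beg1 beg2

-- ===== PRECONDITION & SPEC =====
def Spec_mafBlocks (beg1 : Int) (beg2 : Int) (seq1 : String) (seq2 : String) (out : List (Int × Int × Int)) : Prop := out = mafBlocks_alt beg1 beg2 seq1 seq2
instance (beg1 : Int) (beg2 : Int) (seq1 : String) (seq2 : String) (out : List (Int × Int × Int)) : Decidable (Spec_mafBlocks beg1 beg2 seq1 seq2 out) := by unfold Spec_mafBlocks; infer_instance

-- ===== CLAIM (what is proved, stated in full; the proofs are below) =====
def Claim_equal_mafBlocks : Prop := ∀ (beg1 : Int) (beg2 : Int) (seq1 : String) (seq2 : String), Dom_mafBlocks beg1 beg2 seq1 seq2 → Spec_mafBlocks beg1 beg2 seq1 seq2 (mafBlocks beg1 beg2 seq1 seq2)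

-- ===== LEMMAS AND PROOFS =====
-- Combined invariant: with pending size 0, A agrees with B directly; with positive pending
-- size s, A first flushes (b1, b2, s + length of the match-run ahead) and then agrees with B
-- past that run.
theorem mafAGo_inv (l : List (Char × Char)) : ∀ (b1 b2 s : Int), 0 ≤ s →
    mafAGo l b1 b2 s =
      (if s = 0 then mafBGo l b1 b2
       else
        (b1, b2, s + (l.takeWhile isMatchCol).length) ::
          mafBGo (l.drop (l.takeWhile isMatchCol).length)
            (b1 + (s + (l.takeWhile isMatchCol).length))
            (b2 + (s + (l.takeWhile isMatchCol).length))) := by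
  induction l with
  | nil =>
    intro b1 b2 s hs
    by_cases h : s = 0 <;> simp [mafAGo, mafBGo, h]
  | cons p rest ih =>
    intro b1 b2 s hs
    obtain ⟨x, y⟩ := p
    by_cases hx : x = '-'
    · subst hx
      have hm : isMatchCol ('-', y) = false := by simp [isMatchCol]
      by_cases h : s = 0
      · subst h
        rw [mafAGo, mafBGo]
        simp only [hm, Bool.false_eq_true, if_false, if_true]
        simpa using ih b1 (b2 + 1) 0 le_rfl
      · rw [mafAGo, mafBGo]
        simp only [if_neg h, List.takeWhile_cons, hm, Bool.false_eq_true,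
          if_false, List.length_nil, List.drop_zero, Int.natCast_zero, add_zero]
        rw [mafBGo]
        simp only [hm, Bool.false_eq_true, if_false]
        simp only [ite_true, ne_eq, if_pos h]
        exact congrArg (List.cons _) (by simpa using ih (b1 + s) (b2 + s + 1) 0 le_rfl)
    · by_cases hy : y = '-'
      · subst hy
        have hm : isMatchCol (x, '-') = false := by simp [isMatchCol]
        by_cases h : s = 0
        · subst h
          rw [mafAGo, mafBGo]
          simp only [if_neg hx, hm, Bool.false_eq_true, if_false]
          simpa using ih (b1 + 1) b2 0 le_rfl
        · rw [mafAGo, mafBGo]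
          simp only [if_neg hx, if_neg h, List.takeWhile_cons, hm,
            Bool.false_eq_true, if_false, List.length_nil, List.drop_zero,
            Int.natCast_zero, add_zero]
          rw [mafBGo]
          simp only [hm, Bool.false_eq_true, if_false, if_neg hx]
          simp only [ite_true, ne_eq, if_pos h]
          exact congrArg (List.cons _) (by simpa using ih (b1 + s + 1) (b2 + s) 0 le_rfl)
      · have hm : isMatchCol (x, y) = true := by simp [isMatchCol, hx, hy]
        rw [mafAGo]
        simp only [if_neg hx, if_neg hy]
        rw [ih b1 b2 (s + 1) (by omega)]
        have hs1 : s + 1 ≠ 0 := by omega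
        rw [if_neg hs1]
        simp only [List.takeWhile_cons, hm, if_true, List.length_cons,
          List.drop_succ_cons]
        have e : ∀ t : Nat, s + 1 + (t : Int) = s + ((t + 1 : Nat) : Int) := by
          intro t; push_cast; ring
        rw [e]
        by_cases h : s = 0
        · subst h
          rw [if_pos rfl, mafBGo]
          simp only [hm, if_true]
          norm_num
          have e2 : ((List.takeWhile isMatchCol rest).length : Int) + 1 =
              1 + (List.takeWhile isMatchCol rest).length := by ring
          rw [e2]
          exact ⟨rfl, rfl⟩
        · rw [if_neg h]

-- ===== VERDICT (by name: the statement is the Claim_ definition above) =====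
theorem mafBlocks_spec : Claim_equal_mafBlocks := by
  intro b1 b2 s1 s2 _
  unfold Spec_mafBlocks mafBlocks mafBlocks_alt
  simpa using mafAGo_inv (List.zip s1.toList s2.toList) b1 b2 0 le_rfl
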